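-- pv_equiv track=rewrite | github.com/Nayanx0013/Phishguard-Backend-extension | features.py | _domain_is_path_exempt
-- ===== SOURCE A (Python) =====
-- _PATH_KEYWORD_EXEMPT = {
--     "awsacademy.com", "awseducate.com", "amazonaws.com",
--     "canvas.instructure.com", "blackboard.com", "moodle.org",
--     "d2l.com", "brightspace.com", "coursera.org", "edx.org", "udemy.com",
--     "salesforce.com", "trailhead.salesforce.com",
--     "atlassian.com", "auth0.com", "okta.com", "onelogin.com",
--     "login.gov", "id.me", "zoom.us", "slack.com", "notion.so",
--     "github.com", "gitlab.com", "google.com", "microsoft.com",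
--     "apple.com", "amazon.com",
-- }
--
-- def _domain_is_path_exempt(domain: str) -> bool:
--     d = domain.lower()
--     for trusted in _PATH_KEYWORD_EXEMPT:
--         if d == trusted or d.endswith("." + trusted):
--             return True
--     parts = d.split(".")
--     if len(parts) >= 2:
--         tld  = parts[-1]
--         tld2 = ".".join(parts[-2:])
--         if tld in {"edu", "gov", "mil"}:
--             return True
--         if tld2 in {"ac.in", "ac.uk", "ac.jp", "gov.in", "gov.uk", "gov.au", "edu.au"}:
--             return True
--     return False
-- ===== SOURCE B (Python) =====
-- _PATH_KEYWORD_EXEMPT = {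
--     "awsacademy.com", "awseducate.com", "amazonaws.com",
--     "canvas.instructure.com", "blackboard.com", "moodle.org",
--     "d2l.com", "brightspace.com", "coursera.org", "edx.org", "udemy.com",
--     "salesforce.com", "trailhead.salesforce.com",
--     "atlassian.com", "auth0.com", "okta.com", "onelogin.com",
--     "login.gov", "id.me", "zoom.us", "slack.com", "notion.so",
--     "github.com", "gitlab.com", "google.com", "microsoft.com",
--     "apple.com", "amazon.com",
-- }
--
-- def _domain_is_path_exempt(domain: str) -> bool:
--     parts = domain.lower().split(".")
--     # build every dot-bounded suffix back-to-front with an accumulator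
--     suffixes = []
--     acc = None
--     for p in reversed(parts):
--         acc = p if acc is None else p + "." + acc
--         suffixes.append(acc)
--     for s in suffixes:
--         if s in _PATH_KEYWORD_EXEMPT:
--             return True
--     if len(parts) >= 2:
--         # suffixes[0] is the last label, suffixes[1] the last two labels joined
--         return suffixes[0] in {"edu", "gov", "mil"} or suffixes[1] in {
--             "ac.in", "ac.uk", "ac.jp", "gov.in", "gov.uk", "gov.au", "edu.au"}
--     return False
-- ===== Notes on version B (the rewrite author's own statement) =====
-- stated objective: alternative
-- what changed: B no longer scans the trusted set with ==/endswith per entry; it builds the domain's dot-bounded suffixes back-to-front with an accumulator over the reversed label list, checks each with O(1) set membership, and reuses the two shortest suffixes for the TLD/second-level checks instead of re-indexing and re-joining parts.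
import Mathlib
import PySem

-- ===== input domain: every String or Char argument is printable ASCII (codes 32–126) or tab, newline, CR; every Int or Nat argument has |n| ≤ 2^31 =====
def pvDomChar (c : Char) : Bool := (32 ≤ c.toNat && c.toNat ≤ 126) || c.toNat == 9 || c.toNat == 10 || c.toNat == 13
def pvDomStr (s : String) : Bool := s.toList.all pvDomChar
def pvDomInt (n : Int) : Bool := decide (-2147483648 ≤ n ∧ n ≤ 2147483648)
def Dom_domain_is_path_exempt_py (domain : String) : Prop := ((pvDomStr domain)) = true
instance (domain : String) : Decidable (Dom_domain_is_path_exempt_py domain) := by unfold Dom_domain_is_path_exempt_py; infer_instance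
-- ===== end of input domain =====

-- B replaces A's scan of the trusted set (== / endswith per entry) by building the lowered
-- domain's dot-bounded suffixes back-to-front with an accumulator and testing set membership,
-- reusing the two shortest suffixes for the TLD checks; objective: alternative.

-- the module constant _PATH_KEYWORD_EXEMPT (shared data, not code)
def pvTrusted : List (List Char) := [
  "awsacademy.com".toList, "awseducate.com".toList, "amazonaws.com".toList,
  "canvas.instructure.com".toList, "blackboard.com".toList, "moodle.org".toList,
  "d2l.com".toList, "brightspace.com".toList, "coursera.org".toList, "edx.org".toList, "udemy.com".toList,
  "salesforce.com".toList, "trailhead.salesforce.com".toList,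
  "atlassian.com".toList, "auth0.com".toList, "okta.com".toList, "onelogin.com".toList,
  "login.gov".toList, "id.me".toList, "zoom.us".toList, "slack.com".toList, "notion.so".toList,
  "github.com".toList, "gitlab.com".toList, "google.com".toList, "microsoft.com".toList,
  "apple.com".toList, "amazon.com".toList]

def pvTLDs : List (List Char) := ["edu".toList, "gov".toList, "mil".toList]

def pvTLD2s : List (List Char) := ["ac.in".toList, "ac.uk".toList, "ac.jp".toList,
  "gov.in".toList, "gov.uk".toList, "gov.au".toList, "edu.au".toList]

-- ===== PORT A =====
-- for trusted in set: if d == trusted or d.endswith("." + trusted): return True  → any over the entries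
def domain_is_path_exempt_py (domain : String) : Bool :=
  let d := PySem.Chars.lower domain.toList
  if pvTrusted.any (fun t => d == t || PySem.Chars.endswith d ('.' :: t)) then true
  else
    let parts := PySem.Chars.splitOn d ['.']
    if 2 ≤ parts.length then
      let tld := (PySem.List.pyGet? parts (-1)).getD []
      let tld2 := PySem.Chars.join ['.'] (PySem.List.slice parts (some (-2)) none)
      if pvTLDs.contains tld then true
      else if pvTLD2s.contains tld2 then true
      else false
    else false

-- ===== PORT B =====
-- acc = p if acc is None else p + "." + acc; suffixes.append(acc)  — one fold over reversed(parts)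
def pvStep (st : Option (List Char) × List (List Char)) (p : List Char) :
    Option (List Char) × List (List Char) :=
  let acc := match st.1 with
    | none => p
    | some a => p ++ '.' :: a
  (some acc, st.2 ++ [acc])

def domain_is_path_exempt_py_alt (domain : String) : Bool :=
  let parts := PySem.Chars.splitOn (PySem.Chars.lower domain.toList) ['.']
  let sufs := (parts.reverse.foldl pvStep (none, [])).2
  if sufs.any (fun s => pvTrusted.contains s) then true
  else if 2 ≤ parts.length then
    pvTLDs.contains ((PySem.List.pyGet? sufs 0).getD []) ||
      pvTLD2s.contains ((PySem.List.pyGet? sufs 1).getD [])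
  else false

-- ===== PRECONDITION & SPEC =====
def Spec_domain_is_path_exempt_py (domain : String) (out : Bool) : Prop := out = domain_is_path_exempt_py_alt domain
instance (domain : String) (out : Bool) : Decidable (Spec_domain_is_path_exempt_py domain out) := by unfold Spec_domain_is_path_exempt_py; infer_instance

-- ===== CLAIM (what is proved, stated in full; the proofs are below) =====
def Claim_equal_domain_is_path_exempt_py : Prop := ∀ (domain : String), Dom_domain_is_path_exempt_py domain → Spec_domain_is_path_exempt_py domain (domain_is_path_exempt_py domain)

-- ===== LEMMAS AND PROOFS =====

-- reference split-on-'.' (structural recursion), used only in the proofs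
def splitD : List Char → List (List Char)
  | [] => [[]]
  | c :: r =>
    if c = '.' then [] :: splitD r
    else
      match splitD r with
      | p :: qs => (c :: p) :: qs
      | [] => [[c]]

def consHead (cur : List Char) : List (List Char) → List (List Char)
  | p :: qs => (cur ++ p) :: qs
  | [] => []

theorem splitD_exists (cs : List Char) : ∃ p qs, splitD cs = p :: qs := by
  induction cs with
  | nil => exact ⟨[], [], rfl⟩
  | cons c r ih =>
    obtain ⟨p, qs, h⟩ := ih
    by_cases hc : c = '.'
    · exact ⟨[], splitD r, by simp [splitD, hc]⟩
    · exact ⟨c :: p, qs, by simp [splitD, hc, h]⟩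

theorem splitD_dot (r : List Char) : splitD ('.' :: r) = [] :: splitD r := by
  simp [splitD]

theorem splitD_char (c : Char) (r : List Char) (hc : c ≠ '.') (p : List Char)
    (qs : List (List Char)) (hr : splitD r = p :: qs) : splitD (c :: r) = (c :: p) :: qs := by
  simp [splitD, hc, hr]

theorem go_eq (fuel : Nat) : ∀ (l cur : List Char) (acc : List (List Char)), l.length ≤ fuel →
    PySem.Chars.splitOn.go ['.'] fuel l cur acc = acc.reverse ++ consHead cur.reverse (splitD l) := by
  induction fuel with
  | zero =>
    intro l cur acc h
    have hl : l = [] := by cases l <;> simp_all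
    subst hl
    rw [PySem.Chars.splitOn.go.eq_def]
    simp [splitD, consHead]
  | succ fuel ih =>
    intro l cur acc h
    cases l with
    | nil =>
      rw [PySem.Chars.splitOn.go.eq_def]
      simp [splitD, consHead]
    | cons c rest =>
      rw [PySem.Chars.splitOn.go.eq_def]
      simp only [List.isPrefixOf, Bool.and_true]
      by_cases hc : c = '.'
      · subst hc
        simp only [beq_self_eq_true, if_true, List.length_cons, List.drop_succ_cons,
          List.length_nil, List.drop_zero]
        rw [ih rest [] (cur.reverse :: acc) (by simp at h; omega)]
        obtain ⟨p, qs, hr⟩ := splitD_exists rest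
        rw [splitD_dot, hr]
        simp [consHead]
      · have hb : ('.' == c) = false := beq_eq_false_iff_ne.mpr (fun e => hc e.symm)
        simp only [hb, if_neg (by simp : ¬ (false = true))]
        rw [ih rest (c :: cur) acc (by simp at h; omega)]
        obtain ⟨p, qs, hr⟩ := splitD_exists rest
        rw [splitD_char c rest hc p qs hr, hr]
        simp [consHead]

theorem splitOn_dot (cs : List Char) : PySem.Chars.splitOn cs ['.'] = splitD cs := by
  unfold PySem.Chars.splitOn
  rw [go_eq (cs.length + 1) cs [] [] (by omega)]
  obtain ⟨p, qs, h⟩ := splitD_exists cs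
  simp [h, consHead]

theorem join_splitD (cs : List Char) : PySem.Chars.join ['.'] (splitD cs) = cs := by
  induction cs with
  | nil => simp [splitD, PySem.Chars.join_singleton]
  | cons c r ih =>
    obtain ⟨p, qs, hr⟩ := splitD_exists r
    by_cases hc : c = '.'
    · subst hc
      rw [splitD_dot, hr, PySem.Chars.join_cons_cons, ← hr, ih]
      simp
    · rw [splitD_char c r hc p qs hr]
      rw [hr] at ih
      cases qs with
      | nil =>
        rw [PySem.Chars.join_singleton] at ih ⊢
        rw [ih]
      | cons q qs' =>
        rw [PySem.Chars.join_cons_cons] at ih ⊢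
        rw [← ih]
        simp

theorem nodot_splitD (cs : List Char) : ∀ p ∈ splitD cs, '.' ∉ p := by
  induction cs with
  | nil =>
    intro p hp
    simp [splitD] at hp
    simp [hp]
  | cons c r ih =>
    obtain ⟨p₀, qs, hr⟩ := splitD_exists r
    intro p hp
    by_cases hc : c = '.'
    · subst hc
      rw [splitD_dot, List.mem_cons] at hp
      rcases hp with rfl | hmem
      · simp
      · exact ih p hmem
    · rw [splitD_char c r hc p₀ qs hr, List.mem_cons] at hp
      rcases hp with rfl | hmem
      · have h0 := ih p₀ (by rw [hr]; exact List.mem_cons_self)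
        intro hd
        rw [List.mem_cons] at hd
        rcases hd with hd | hd
        · exact hc hd.symm
        · exact h0 hd
      · exact ih p (by rw [hr]; exact List.mem_cons_of_mem _ hmem)

theorem suffix_dot_append (a : List Char) : ∀ (b t : List Char), '.' ∉ a →
    (('.' :: t) <:+ (a ++ b) ↔ ('.' :: t) <:+ b) := by
  induction a with
  | nil => intro b t _; simp
  | cons x a' ih =>
    intro b t hx
    rw [List.mem_cons] at hx
    have hx1 : ¬ ('.' = x) := fun e => hx (Or.inl e)
    have hx2 : '.' ∉ a' := fun e => hx (Or.inr e)
    simp only [List.cons_append, List.suffix_cons_iff]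
    rw [ih b t hx2]
    constructor
    · rintro (h | h)
      · injection h with h1 _
        exact absurd h1 hx1
      · exact h
    · exact Or.inr

theorem suffix_char (parts : List (List Char)) :
    (∀ p ∈ parts, '.' ∉ p) → ∀ t,
    (('.' :: t) <:+ PySem.Chars.join ['.'] parts ↔
      ∃ j, 1 ≤ j ∧ j < parts.length ∧ PySem.Chars.join ['.'] (parts.drop j) = t) := by
  induction parts with
  | nil =>
    intro _ t
    rw [PySem.Chars.join_nil]
    simp [List.suffix_nil]
  | cons p rest ih =>
    intro h t
    cases rest with
    | nil =>
      rw [PySem.Chars.join_singleton]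
      constructor
      · intro hs
        exact absurd (hs.subset List.mem_cons_self) (h p List.mem_cons_self)
      · rintro ⟨j, h1, h2, _⟩
        simp at h2; omega
    | cons q r =>
      have hj : PySem.Chars.join ['.'] (p :: q :: r) =
          p ++ ('.' :: PySem.Chars.join ['.'] (q :: r)) := by
        rw [PySem.Chars.join_cons_cons]; simp
      rw [hj, suffix_dot_append p _ t (h p List.mem_cons_self), List.suffix_cons_iff]
      rw [ih (fun p' hp' => h p' (List.mem_cons_of_mem _ hp')) t]
      constructor
      · rintro (he | ⟨j', h1, h2, h3⟩)
        · refine ⟨1, by omega, by simp, ?_⟩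
          simpa using ((List.cons.injEq _ _ _ _ ▸ he).2).symm
        · exact ⟨j' + 1, by omega, by simp at h2 ⊢; omega, by simpa using h3⟩
      · rintro ⟨j, h1, h2, h3⟩
        obtain ⟨j', rfl⟩ : ∃ j', j = j' + 1 := ⟨j - 1, by omega⟩
        simp only [List.drop_succ_cons] at h3
        cases Nat.eq_zero_or_pos j' with
        | inl h0 => subst h0; left; simp at h3; rw [h3]
        | inr hpos => right; exact ⟨j', by omega, by simp at h2 ⊢; omega, h3⟩

theorem suffix_or_eq_iff (cs t : List Char) :
    (cs = t ∨ ('.' :: t) <:+ cs) ↔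
      ∃ j, j < (splitD cs).length ∧ PySem.Chars.join ['.'] ((splitD cs).drop j) = t := by
  obtain ⟨p, qs, hsp⟩ := splitD_exists cs
  constructor
  · rintro (rfl | hs)
    · exact ⟨0, by simp [hsp], by simp [join_splitD]⟩
    · rw [← join_splitD cs] at hs
      obtain ⟨j, _, h2, h3⟩ := (suffix_char (splitD cs) (nodot_splitD cs) t).mp hs
      exact ⟨j, h2, h3⟩
  · rintro ⟨j, hj, he⟩
    cases Nat.eq_zero_or_pos j with
    | inl h0 =>
      subst h0
      rw [List.drop_zero, join_splitD] at he
      exact Or.inl he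
    | inr hpos =>
      refine Or.inr ?_
      rw [← join_splitD cs]
      exact (suffix_char (splitD cs) (nodot_splitD cs) t).mpr ⟨j, by omega, hj, he⟩

-- characterisation of B's fold: first component = join of all parts, second = the suffixes,
-- shortest first (index j = join of parts.drop j, over (range n).reverse)
theorem foldr_step_spec (parts : List (List Char)) :
    parts.foldr (fun x acc => pvStep acc x) (none, []) =
      ((if parts = [] then none else some (PySem.Chars.join ['.'] parts)),
       ((List.range parts.length).reverse).map
         (fun j => PySem.Chars.join ['.'] (parts.drop j))) := by
  induction parts with
  | nil => simp
  | cons q qs ih =>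
    rw [List.foldr_cons, ih]
    cases qs with
    | nil =>
      simp [pvStep, PySem.Chars.join_singleton]
    | cons r rs =>
      have hjoin : q ++ '.' :: PySem.Chars.join ['.'] (r :: rs) =
          PySem.Chars.join ['.'] (q :: r :: rs) := by
        rw [PySem.Chars.join_cons_cons]; simp
      simp only [pvStep, if_neg (by simp : ¬ (r :: rs = [])),
        if_neg (by simp : ¬ (q :: r :: rs = []))]
      refine Prod.ext ?_ ?_
      · simp [hjoin]
      · show ((List.range (r :: rs).length).reverse).map
            (fun j => PySem.Chars.join ['.'] ((r :: rs).drop j)) ++ [_] = _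
        rw [List.length_cons (a := q), List.range_succ_eq_map, List.reverse_cons,
          ← List.map_reverse, List.map_append, List.map_map]
        congr 1

theorem fold_snd (parts : List (List Char)) :
    (parts.reverse.foldl pvStep (none, [])).2 =
      ((List.range parts.length).reverse).map
        (fun j => PySem.Chars.join ['.'] (parts.drop j)) := by
  rw [List.foldl_reverse]
  rw [foldr_step_spec]

-- the two Bool conditions for the trusted-set test coincide
theorem cond_eq (d : List Char) :
    pvTrusted.any (fun t => d == t || PySem.Chars.endswith d ('.' :: t)) =
    ((PySem.Chars.splitOn d ['.']).reverse.foldl pvStep (none, [])).2.any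
      (fun s => pvTrusted.contains s) := by
  rw [Bool.eq_iff_iff]
  simp only [List.any_eq_true, splitOn_dot, fold_snd]
  constructor
  · rintro ⟨t, ht, hf⟩
    have hft : d = t ∨ ('.' :: t) <:+ d := by
      rcases Bool.or_eq_true _ _ |>.mp hf with h | h
      · exact Or.inl (beq_iff_eq.mp h)
      · exact Or.inr ((PySem.Chars.endswith_iff _ _).mp h)
    obtain ⟨j, hj, he⟩ := (suffix_or_eq_iff d t).mp hft
    refine ⟨PySem.Chars.join ['.'] ((splitD d).drop j), ?_, ?_⟩
    · exact List.mem_map.mpr ⟨j, by simp [hj], rfl⟩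
    · rw [he]; exact List.contains_iff_mem.mpr ht
  · rintro ⟨s, hs, hc⟩
    obtain ⟨j, hjr, rfl⟩ := List.mem_map.mp hs
    have hj : j < (splitD d).length := by simpa using hjr
    have hmem := List.contains_iff_mem.mp hc
    refine ⟨_, hmem, ?_⟩
    have hor := (suffix_or_eq_iff d (PySem.Chars.join ['.'] ((splitD d).drop j))).mpr ⟨j, hj, rfl⟩
    rcases hor with h | h
    · rw [← h]; simp
    · have he := (PySem.Chars.endswith_iff _ _).mpr h
      simp [he]

theorem drop_pred (l : List (List Char)) (hl : l ≠ []) :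
    l.drop (l.length - 1) = [l.getLast?.getD []] := by
  induction l with
  | nil => simp at hl
  | cons a t ih =>
    cases t with
    | nil => simp
    | cons b u => simpa using ih (by simp)

-- B's sufs[0] equals A's parts[-1] (when parts has ≥ 2 elements)
theorem suf0_eq (parts : List (List Char)) (h : 2 ≤ parts.length) :
    (PySem.List.pyGet? (((List.range parts.length).reverse).map
        (fun j => PySem.Chars.join ['.'] (parts.drop j))) 0).getD [] =
      (PySem.List.pyGet? parts (-1)).getD [] := by
  obtain ⟨n, hn⟩ : ∃ n, parts.length = n + 2 := ⟨parts.length - 2, by omega⟩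
  have hr : (List.range parts.length).reverse =
      (parts.length - 1) :: (List.range (parts.length - 1)).reverse := by
    rw [hn]; rw [List.range_succ]; simp
  rw [hr, List.map_cons, PySem.List.pyGet?_zero_cons, PySem.List.pyGet?_neg_one]
  simp only [Option.getD_some]
  rw [drop_pred parts (by intro h0; rw [h0] at hn; simp at hn),
    PySem.Chars.join_singleton]

theorem pyGet?_one_cons {α : Type} (a b : α) (l : List α) :
    PySem.List.pyGet? (a :: b :: l) 1 = some b := by
  simp [PySem.List.pyGet?, PySem.List.pyIdx?]

-- B's sufs[1] equals A's ".".join(parts[-2:]) (when parts has ≥ 2 elements)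
theorem suf1_eq (parts : List (List Char)) (h : 2 ≤ parts.length) :
    (PySem.List.pyGet? (((List.range parts.length).reverse).map
        (fun j => PySem.Chars.join ['.'] (parts.drop j))) 1).getD [] =
      PySem.Chars.join ['.'] (PySem.List.slice parts (some (-2)) none) := by
  obtain ⟨n, hn⟩ : ∃ n, parts.length = n + 2 := ⟨parts.length - 2, by omega⟩
  have hr : (List.range parts.length).reverse =
      (n + 1) :: n :: (List.range n).reverse := by
    rw [hn, List.range_succ, List.range_succ]; simp
  rw [hr, List.map_cons, List.map_cons, pyGet?_one_cons]
  simp only [Option.getD_some]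
  rw [PySem.List.slice_from_neg_ofNat parts 2 (by omega), hn]
  congr 1

-- ===== VERDICT (by name: the statement is the Claim_ definition above) =====
theorem domain_is_path_exempt_py_spec : Claim_equal_domain_is_path_exempt_py := by
  intro domain _
  unfold Spec_domain_is_path_exempt_py
  simp only [domain_is_path_exempt_py, domain_is_path_exempt_py_alt]
  rw [cond_eq (PySem.Chars.lower domain.toList)]
  set parts := PySem.Chars.splitOn (PySem.Chars.lower domain.toList) ['.'] with hp
  by_cases hany : (((parts.reverse.foldl pvStep (none, [])).2).any
      (fun s => pvTrusted.contains s)) = true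
  · rw [if_pos hany, if_pos hany]
  · rw [if_neg hany, if_neg hany]
    by_cases hlen : 2 ≤ parts.length
    · rw [if_pos hlen, if_pos hlen, fold_snd, suf0_eq parts hlen, suf1_eq parts hlen]
      cases hc : pvTLDs.contains ((PySem.List.pyGet? parts (-1)).getD []) <;> simp
    · rw [if_neg hlen, if_neg hlen]
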